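-- pv_equiv track=rewrite | github.com/AlexC1991/VoxAI_IDE | ui/chat_panel_state.py | _is_continue_directive
-- ===== SOURCE A (Python) =====
-- def _is_continue_directive(text: str | None) -> bool:
--     normalized = str(text or "").strip().lower()
--     return normalized in {"continue", "next", "resume", "proceed", "go on"} or any(
--         normalized.startswith(prefix)
--         for prefix in (
--             "continue.", "continue,", "continue ",
--             "next.", "next,", "next ",
--             "resume.", "resume,", "resume ",
--             "proceed.", "proceed,", "proceed ",
--             "go on.", "go on,", "go on ",
--         )
--     )
-- ===== SOURCE B (Python) =====
-- _KEYWORDS = ("continue", "next", "resume", "proceed", "go on")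
-- _DELIMS = (".", ",", " ")
--
--
-- def _is_continue_directive(text):
--     normalized = str(text or "").strip().lower()
--     for kw in _KEYWORDS:
--         if normalized == kw:
--             return True
--         if normalized.startswith(kw) and normalized[len(kw):len(kw) + 1] in _DELIMS:
--             return True
--     return False
-- ===== Notes on version B (the rewrite author's own statement) =====
-- stated objective: simpler
-- what changed: Replaces the 5-way exact-match set plus an enumerated 15-prefix startswith scan by a single loop over the 5 keywords that checks exact equality or keyword-prefix followed by one delimiter character (period, comma or space).
import Mathlib
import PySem

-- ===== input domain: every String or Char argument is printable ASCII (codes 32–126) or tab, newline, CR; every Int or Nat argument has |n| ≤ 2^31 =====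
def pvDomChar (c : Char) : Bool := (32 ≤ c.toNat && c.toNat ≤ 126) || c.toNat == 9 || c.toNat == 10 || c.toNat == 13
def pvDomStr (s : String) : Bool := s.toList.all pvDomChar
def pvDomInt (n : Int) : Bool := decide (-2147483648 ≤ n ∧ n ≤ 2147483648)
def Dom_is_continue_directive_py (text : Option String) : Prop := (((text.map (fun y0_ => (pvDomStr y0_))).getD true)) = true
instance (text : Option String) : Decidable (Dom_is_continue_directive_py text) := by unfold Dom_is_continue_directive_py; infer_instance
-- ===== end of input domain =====

-- B replaces A's enumerated 15-prefix scan by a 5-keyword loop with a one-character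
-- delimiter test; objective: simpler (same behaviour, fewer hand-written prefixes).

-- ===== PORT A =====
def is_continue_directive_py (text : Option String) : Bool :=
  let normalized := PySem.Str.lower (PySem.Str.strip (text.getD ""))
  (["continue", "next", "resume", "proceed", "go on"] : List String).contains normalized ||
  (["continue.", "continue,", "continue ",
    "next.", "next,", "next ",
    "resume.", "resume,", "resume ",
    "proceed.", "proceed,", "proceed ",
    "go on.", "go on,", "go on "] : List String).any
      (fun prefix_ => PySem.Str.startswith normalized prefix_)

-- ===== PORT B =====
def pvAltKeywords : List String := ["continue", "next", "resume", "proceed", "go on"]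
def pvAltDelims : List String := [".", ",", " "]

def is_continue_directive_py_alt (text : Option String) : Bool :=
  let normalized := PySem.Str.lower (PySem.Str.strip (text.getD ""))
  pvAltKeywords.any (fun kw =>
    normalized == kw ||
    (PySem.Str.startswith normalized kw &&
      pvAltDelims.contains
        (PySem.Str.slice normalized (some (PySem.Str.len kw)) (some (PySem.Str.len kw + 1)))))

-- ===== PRECONDITION & SPEC =====
def Spec_is_continue_directive_py (text : Option String) (out : Bool) : Prop := out = is_continue_directive_py_alt text
instance (text : Option String) (out : Bool) : Decidable (Spec_is_continue_directive_py text out) := by unfold Spec_is_continue_directive_py; infer_instance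

-- ===== CLAIM (what is proved, stated in full; the proofs are below) =====
def Claim_equal_is_continue_directive_py : Prop := ∀ (text : Option String), Dom_is_continue_directive_py text → Spec_is_continue_directive_py text (is_continue_directive_py text)

-- ===== LEMMAS AND PROOFS =====

-- prefix-by-one-more-character, characterised by drop/take at the keyword's length
lemma snoc_prefix_iff (k l : List Char) (c : Char) :
    (k ++ [c]) <+: l ↔ k <+: l ∧ (l.drop k.length).take 1 = [c] := by
  constructor
  · rintro ⟨t, rfl⟩
    refine ⟨⟨c :: t, by simp⟩, ?_⟩
    rw [List.append_assoc]
    simp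
  · rintro ⟨⟨t, rfl⟩, h⟩
    rw [List.drop_left] at h
    cases t with
    | nil => simp at h
    | cons x u =>
      simp at h
      exact ⟨u, by simp [h]⟩

-- the one-character slice normalized[len(kw):len(kw)+1] as drop/take
lemma slice_one_toList (n kw : String) :
    (PySem.Str.slice n (some (PySem.Str.len kw)) (some (PySem.Str.len kw + 1))).toList
      = (n.toList.drop kw.toList.length).take 1 := by
  rw [PySem.Str.toList_slice, PySem.Chars.slice_eq_listSlice, PySem.Str.len_eq]
  have : (kw.toList.length : Int) + 1 = ((kw.toList.length : Int) + ((1 : Nat) : Int)) := by push_cast; ring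
  rw [this, PySem.List.slice_natCast_add]

-- per-keyword: the three enumerated prefixes are exactly "starts with kw, then a delimiter"
lemma hitP (n kw dot com sp : String)
    (hd : dot.toList = kw.toList ++ ['.'])
    (hc : com.toList = kw.toList ++ [','])
    (hs : sp.toList = kw.toList ++ [' ']) :
    (PySem.Str.startswith n dot = true ∨ PySem.Str.startswith n com = true ∨
      PySem.Str.startswith n sp = true)
  ↔ (PySem.Str.startswith n kw = true ∧
      pvAltDelims.contains
        (PySem.Str.slice n (some (PySem.Str.len kw)) (some (PySem.Str.len kw + 1))) = true) := by
  have hsl := slice_one_toList n kw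
  simp only [PySem.Str.startswith_eq, hd, hc, hs, PySem.Chars.startswith_iff,
    snoc_prefix_iff, pvAltDelims, List.contains_cons, List.contains_nil,
    Bool.or_eq_true, beq_iff_eq, Bool.or_false]
  constructor
  · rintro (⟨h1, h2⟩ | ⟨h1, h2⟩ | ⟨h1, h2⟩)
    · exact ⟨h1, Or.inl (by rw [← String.toList_inj, hsl, h2]; decide)⟩
    · exact ⟨h1, Or.inr (Or.inl (by rw [← String.toList_inj, hsl, h2]; decide))⟩
    · exact ⟨h1, Or.inr (Or.inr (by rw [← String.toList_inj, hsl, h2]; decide))⟩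
  · rintro ⟨h1, (h2 | h2 | h2)⟩ <;>
      rw [← String.toList_inj, hsl] at h2
    · exact Or.inl ⟨h1, by rw [h2]; decide⟩
    · exact Or.inr (Or.inl ⟨h1, by rw [h2]; decide⟩)
    · exact Or.inr (Or.inr ⟨h1, by rw [h2]; decide⟩)

set_option maxHeartbeats 1000000 in
-- the two membership/scan expressions agree for every normalized string
lemma cores (n : String) :
    ((["continue", "next", "resume", "proceed", "go on"] : List String).contains n ||
     (["continue.", "continue,", "continue ",
       "next.", "next,", "next ",
       "resume.", "resume,", "resume ",
       "proceed.", "proceed,", "proceed ",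
       "go on.", "go on,", "go on "] : List String).any
         (fun prefix_ => PySem.Str.startswith n prefix_))
  = pvAltKeywords.any (fun kw =>
      n == kw ||
      (PySem.Str.startswith n kw &&
        pvAltDelims.contains
          (PySem.Str.slice n (some (PySem.Str.len kw)) (some (PySem.Str.len kw + 1))))) := by
  have h1 := hitP n "continue" "continue." "continue," "continue " (by decide) (by decide) (by decide)
  have h2 := hitP n "next" "next." "next," "next " (by decide) (by decide) (by decide)
  have h3 := hitP n "resume" "resume." "resume," "resume " (by decide) (by decide) (by decide)
  have h4 := hitP n "proceed" "proceed." "proceed," "proceed " (by decide) (by decide) (by decide)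
  have h5 := hitP n "go on" "go on." "go on," "go on " (by decide) (by decide) (by decide)
  rw [Bool.eq_iff_iff]
  simp only [pvAltKeywords, List.contains_cons, List.contains_nil, List.any_cons, List.any_nil,
    Bool.or_eq_true, Bool.and_eq_true, beq_iff_eq, Bool.or_false] at *
  constructor
  · rintro (es | ss)
    · rcases es with e | e | e | e | e
      · exact Or.inl (Or.inl e)
      · exact Or.inr (Or.inl (Or.inl e))
      · exact Or.inr (Or.inr (Or.inl (Or.inl e)))
      · exact Or.inr (Or.inr (Or.inr (Or.inl (Or.inl e))))
      · exact Or.inr (Or.inr (Or.inr (Or.inr (Or.inl e))))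
    · rcases ss with h | h | h | h | h | h | h | h | h | h | h | h | h | h | h
      · exact Or.inl (Or.inr (h1.mp (Or.inl h)))
      · exact Or.inl (Or.inr (h1.mp (Or.inr (Or.inl h))))
      · exact Or.inl (Or.inr (h1.mp (Or.inr (Or.inr h))))
      · exact Or.inr (Or.inl (Or.inr (h2.mp (Or.inl h))))
      · exact Or.inr (Or.inl (Or.inr (h2.mp (Or.inr (Or.inl h)))))
      · exact Or.inr (Or.inl (Or.inr (h2.mp (Or.inr (Or.inr h)))))
      · exact Or.inr (Or.inr (Or.inl (Or.inr (h3.mp (Or.inl h)))))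
      · exact Or.inr (Or.inr (Or.inl (Or.inr (h3.mp (Or.inr (Or.inl h))))))
      · exact Or.inr (Or.inr (Or.inl (Or.inr (h3.mp (Or.inr (Or.inr h))))))
      · exact Or.inr (Or.inr (Or.inr (Or.inl (Or.inr (h4.mp (Or.inl h))))))
      · exact Or.inr (Or.inr (Or.inr (Or.inl (Or.inr (h4.mp (Or.inr (Or.inl h)))))))
      · exact Or.inr (Or.inr (Or.inr (Or.inl (Or.inr (h4.mp (Or.inr (Or.inr h)))))))
      · exact Or.inr (Or.inr (Or.inr (Or.inr (Or.inr (h5.mp (Or.inl h))))))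
      · exact Or.inr (Or.inr (Or.inr (Or.inr (Or.inr (h5.mp (Or.inr (Or.inl h)))))))
      · exact Or.inr (Or.inr (Or.inr (Or.inr (Or.inr (h5.mp (Or.inr (Or.inr h)))))))
  · rintro ((e | c) | ((e | c) | ((e | c) | ((e | c) | (e | c)))))
    · exact Or.inl (Or.inl (e))
    · rcases h1.mpr c with h | h | h
      · exact Or.inr (Or.inl (h))
      · exact Or.inr (Or.inr (Or.inl (h)))
      · exact Or.inr (Or.inr (Or.inr (Or.inl (h))))
    · exact Or.inl (Or.inr (Or.inl (e)))
    · rcases h2.mpr c with h | h | h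
      · exact Or.inr (Or.inr (Or.inr (Or.inr (Or.inl (h)))))
      · exact Or.inr (Or.inr (Or.inr (Or.inr (Or.inr (Or.inl (h))))))
      · exact Or.inr (Or.inr (Or.inr (Or.inr (Or.inr (Or.inr (Or.inl (h)))))))
    · exact Or.inl (Or.inr (Or.inr (Or.inl (e))))
    · rcases h3.mpr c with h | h | h
      · exact Or.inr (Or.inr (Or.inr (Or.inr (Or.inr (Or.inr (Or.inr (Or.inl (h))))))))
      · exact Or.inr (Or.inr (Or.inr (Or.inr (Or.inr (Or.inr (Or.inr (Or.inr (Or.inl (h)))))))))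
      · exact Or.inr (Or.inr (Or.inr (Or.inr (Or.inr (Or.inr (Or.inr (Or.inr (Or.inr (Or.inl (h))))))))))
    · exact Or.inl (Or.inr (Or.inr (Or.inr (Or.inl (e)))))
    · rcases h4.mpr c with h | h | h
      · exact Or.inr (Or.inr (Or.inr (Or.inr (Or.inr (Or.inr (Or.inr (Or.inr (Or.inr (Or.inr (Or.inl (h)))))))))))
      · exact Or.inr (Or.inr (Or.inr (Or.inr (Or.inr (Or.inr (Or.inr (Or.inr (Or.inr (Or.inr (Or.inr (Or.inl (h))))))))))))
      · exact Or.inr (Or.inr (Or.inr (Or.inr (Or.inr (Or.inr (Or.inr (Or.inr (Or.inr (Or.inr (Or.inr (Or.inr (Or.inl (h)))))))))))))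
    · exact Or.inl (Or.inr (Or.inr (Or.inr (Or.inr (e)))))
    · rcases h5.mpr c with h | h | h
      · exact Or.inr (Or.inr (Or.inr (Or.inr (Or.inr (Or.inr (Or.inr (Or.inr (Or.inr (Or.inr (Or.inr (Or.inr (Or.inr (Or.inl (h))))))))))))))
      · exact Or.inr (Or.inr (Or.inr (Or.inr (Or.inr (Or.inr (Or.inr (Or.inr (Or.inr (Or.inr (Or.inr (Or.inr (Or.inr (Or.inr (Or.inl (h)))))))))))))))
      · exact Or.inr (Or.inr (Or.inr (Or.inr (Or.inr (Or.inr (Or.inr (Or.inr (Or.inr (Or.inr (Or.inr (Or.inr (Or.inr (Or.inr (Or.inr (h)))))))))))))))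

-- ===== VERDICT (by name: the statement is the Claim_ definition above) =====
theorem is_continue_directive_py_spec : Claim_equal_is_continue_directive_py := by
  intro text _
  unfold Spec_is_continue_directive_py is_continue_directive_py is_continue_directive_py_alt
  exact cores _
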